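-- pv_equiv track=rewrite | github.com/OzcelikLab/AAVC | aavc.py | convert_aa_notation
-- ===== SOURCE A (Python) =====
-- def convert_aa_notation(notation):
--
--     amino_acid_mapping = {
--         'Ala': 'A', 'Arg': 'R', 'Asn': 'N', 'Asp': 'D',
--         'Cys': 'C', 'Glu': 'E', 'Gln': 'Q', 'Gly': 'G',
--         'His': 'H', 'Ile': 'I', 'Leu': 'L', 'Lys': 'K',
--         'Met': 'M', 'Phe': 'F', 'Pro': 'P', 'Ser': 'S',
--         'Thr': 'T', 'Trp': 'W', 'Tyr': 'Y', 'Val': 'V',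
--         'Ter': 'X'
--     }
--     # iterate through the input string and convert three-letter codes to single-letter codes
--     result = ''
--     i = 0
--     while i < len(notation):
--         found = False
--         for code, letter in amino_acid_mapping.items():
--             if notation[i:i + 3] == code:
--                 result += letter
--                 i += 3
--                 found = True
--                 break
--         if not found:
--             result += notation[i]
--             i += 1
--
--     return result
-- ===== SOURCE B (Python) =====
-- import re
--
-- _AA_MAPPING = {
--     'Ala': 'A', 'Arg': 'R', 'Asn': 'N', 'Asp': 'D',
--     'Cys': 'C', 'Glu': 'E', 'Gln': 'Q', 'Gly': 'G',
--     'His': 'H', 'Ile': 'I', 'Leu': 'L', 'Lys': 'K',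
--     'Met': 'M', 'Phe': 'F', 'Pro': 'P', 'Ser': 'S',
--     'Thr': 'T', 'Trp': 'W', 'Tyr': 'Y', 'Val': 'V',
--     'Ter': 'X'
-- }
-- _AA_PATTERN = re.compile('|'.join(_AA_MAPPING))
--
--
-- def convert_aa_notation(notation):
--     # single left-to-right regex substitution of any three-letter code
--     return _AA_PATTERN.sub(lambda m: _AA_MAPPING[m.group()], notation)
-- ===== Notes on version B (the rewrite author's own statement) =====
-- stated objective: faster
-- what changed: Replaced the explicit index/found-flag while loop with an inner linear scan over the dict items by a single compiled-regex substitution (the codes joined by alternation, re.sub with a mapping lookup), which reproduces the greedy non-overlapping left-to-right 3-char replacement; the scan and string building run in C.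
import Mathlib
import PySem

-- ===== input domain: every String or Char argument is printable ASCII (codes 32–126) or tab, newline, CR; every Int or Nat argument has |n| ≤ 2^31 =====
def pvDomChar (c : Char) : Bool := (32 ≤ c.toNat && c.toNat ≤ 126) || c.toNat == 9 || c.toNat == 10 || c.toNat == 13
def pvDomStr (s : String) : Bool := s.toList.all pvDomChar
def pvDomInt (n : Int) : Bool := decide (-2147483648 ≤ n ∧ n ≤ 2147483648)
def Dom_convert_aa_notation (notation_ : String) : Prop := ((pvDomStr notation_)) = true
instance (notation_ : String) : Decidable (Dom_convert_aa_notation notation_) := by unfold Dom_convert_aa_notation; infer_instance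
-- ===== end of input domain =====

-- B replaces A's explicit index/found-flag scanner over the dict items by a single compiled-regex
-- substitution; same return value on every input (idiomatic rewrite).

-- ===== PORT A =====
-- the dict amino_acid_mapping, as its insertion-ordered item list (codes as char lists)
def aaPairsA : List (List Char × Char) :=
  [(['A','l','a'], 'A'), (['A','r','g'], 'R'), (['A','s','n'], 'N'), (['A','s','p'], 'D'),
   (['C','y','s'], 'C'), (['G','l','u'], 'E'), (['G','l','n'], 'Q'), (['G','l','y'], 'G'),
   (['H','i','s'], 'H'), (['I','l','e'], 'I'), (['L','e','u'], 'L'), (['L','y','s'], 'K'),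
   (['M','e','t'], 'M'), (['P','h','e'], 'F'), (['P','r','o'], 'P'), (['S','e','r'], 'S'),
   (['T','h','r'], 'T'), (['T','r','p'], 'W'), (['T','y','r'], 'Y'), (['V','a','l'], 'V'),
   (['T','e','r'], 'X')]

-- the inner 'for code, letter in amino_acid_mapping.items(): if notation[i:i+3] == code: … break'
def pyForA : List (List Char × Char) → List Char → Option Char
  | [], _ => none
  | (code, letter) :: rest, slice =>
    if slice = code then some letter else pyForA rest slice

-- the while loop: i only ever grows, so fuel = the input length bounds the iteration count.
-- the slice [i:i+3] for 0 ≤ i is (drop i).take 3; indexing at i < length is getD i (in range, exact).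
def loopA (ns : List Char) (i : Nat) (result : List Char) (fuel : Nat) : List Char :=
  match fuel with
  | 0 => result
  | fuel' + 1 =>
    if i < ns.length then
      match pyForA aaPairsA ((ns.drop i).take 3) with
      | some letter => loopA ns (i + 3) (result ++ [letter]) fuel'
      | none => loopA ns (i + 1) (result ++ [ns.getD i ' ']) fuel'
    else result

def convert_aa_notation (notation_ : String) : String :=
  String.ofList (loopA notation_.toList 0 [] notation_.toList.length)

-- ===== PORT B =====
-- Source B's compiled pattern 'Ala|Arg|…|Ter' (21 plain three-letter literals): the compiled matcher
-- decides, from the next three characters, whether some alternative matches here and which letter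
-- the mapping lambda substitutes for it. Ported as a three-character decision function (PySem has
-- no regex engine; exact for this alternation of distinct plain literals).
def aaMatch3 : Char → Char → Char → Option Char
  | 'A', 'l', 'a' => some 'A'
  | 'A', 'r', 'g' => some 'R'
  | 'A', 's', 'n' => some 'N'
  | 'A', 's', 'p' => some 'D'
  | 'C', 'y', 's' => some 'C'
  | 'G', 'l', 'u' => some 'E'
  | 'G', 'l', 'n' => some 'Q'
  | 'G', 'l', 'y' => some 'G'
  | 'H', 'i', 's' => some 'H'
  | 'I', 'l', 'e' => some 'I'
  | 'L', 'e', 'u' => some 'L'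
  | 'L', 'y', 's' => some 'K'
  | 'M', 'e', 't' => some 'M'
  | 'P', 'h', 'e' => some 'F'
  | 'P', 'r', 'o' => some 'P'
  | 'S', 'e', 'r' => some 'S'
  | 'T', 'h', 'r' => some 'T'
  | 'T', 'r', 'p' => some 'W'
  | 'T', 'y', 'r' => some 'Y'
  | 'V', 'a', 'l' => some 'V'
  | 'T', 'e', 'r' => some 'X'
  | _, _, _ => none

-- re.sub's scan: left to right, non-overlapping; where an alternative matches, substitute its
-- letter and continue after the match, otherwise leave the character in place. With fewer than
-- three characters left no alternative can match.
def reSubAA : List Char → List Char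
  | c1 :: c2 :: c3 :: rest =>
    match aaMatch3 c1 c2 c3 with
    | some letter => letter :: reSubAA rest
    | none => c1 :: reSubAA (c2 :: c3 :: rest)
  | c :: rest => c :: reSubAA rest
  | [] => []
termination_by cs => cs.length
decreasing_by all_goals (simp; try omega)

def convert_aa_notation_alt (notation_ : String) : String :=
  String.ofList (reSubAA notation_.toList)

-- ===== PRECONDITION & SPEC =====
def Spec_convert_aa_notation (notation_ : String) (out : String) : Prop := out = convert_aa_notation_alt notation_
instance (notation_ : String) (out : String) : Decidable (Spec_convert_aa_notation notation_ out) := by unfold Spec_convert_aa_notation; infer_instance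

-- ===== CLAIM (what is proved, stated in full; the proofs are below) =====
def Claim_equal_convert_aa_notation : Prop := ∀ (notation_ : String), Dom_convert_aa_notation notation_ → Spec_convert_aa_notation notation_ (convert_aa_notation notation_)

-- ===== LEMMAS AND PROOFS =====

-- A's inner for-loop on a full three-character slice computes B's compiled three-character decision
set_option maxHeartbeats 1000000 in
theorem pyForA_eq3 (c1 c2 c3 : Char) :
    pyForA aaPairsA [c1, c2, c3] = aaMatch3 c1 c2 c3 := by
  simp only [pyForA, aaPairsA]
  by_cases h1 : [c1, c2, c3] = ['A', 'l', 'a']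
  · obtain ⟨rfl, rfl, rfl⟩ : c1 = 'A' ∧ c2 = 'l' ∧ c3 = 'a' := by simpa using h1
    decide
  rw [if_neg h1]
  by_cases h2 : [c1, c2, c3] = ['A', 'r', 'g']
  · obtain ⟨rfl, rfl, rfl⟩ : c1 = 'A' ∧ c2 = 'r' ∧ c3 = 'g' := by simpa using h2
    decide
  rw [if_neg h2]
  by_cases h3 : [c1, c2, c3] = ['A', 's', 'n']
  · obtain ⟨rfl, rfl, rfl⟩ : c1 = 'A' ∧ c2 = 's' ∧ c3 = 'n' := by simpa using h3
    decide
  rw [if_neg h3]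
  by_cases h4 : [c1, c2, c3] = ['A', 's', 'p']
  · obtain ⟨rfl, rfl, rfl⟩ : c1 = 'A' ∧ c2 = 's' ∧ c3 = 'p' := by simpa using h4
    decide
  rw [if_neg h4]
  by_cases h5 : [c1, c2, c3] = ['C', 'y', 's']
  · obtain ⟨rfl, rfl, rfl⟩ : c1 = 'C' ∧ c2 = 'y' ∧ c3 = 's' := by simpa using h5
    decide
  rw [if_neg h5]
  by_cases h6 : [c1, c2, c3] = ['G', 'l', 'u']
  · obtain ⟨rfl, rfl, rfl⟩ : c1 = 'G' ∧ c2 = 'l' ∧ c3 = 'u' := by simpa using h6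
    decide
  rw [if_neg h6]
  by_cases h7 : [c1, c2, c3] = ['G', 'l', 'n']
  · obtain ⟨rfl, rfl, rfl⟩ : c1 = 'G' ∧ c2 = 'l' ∧ c3 = 'n' := by simpa using h7
    decide
  rw [if_neg h7]
  by_cases h8 : [c1, c2, c3] = ['G', 'l', 'y']
  · obtain ⟨rfl, rfl, rfl⟩ : c1 = 'G' ∧ c2 = 'l' ∧ c3 = 'y' := by simpa using h8
    decide
  rw [if_neg h8]
  by_cases h9 : [c1, c2, c3] = ['H', 'i', 's']
  · obtain ⟨rfl, rfl, rfl⟩ : c1 = 'H' ∧ c2 = 'i' ∧ c3 = 's' := by simpa using h9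
    decide
  rw [if_neg h9]
  by_cases h10 : [c1, c2, c3] = ['I', 'l', 'e']
  · obtain ⟨rfl, rfl, rfl⟩ : c1 = 'I' ∧ c2 = 'l' ∧ c3 = 'e' := by simpa using h10
    decide
  rw [if_neg h10]
  by_cases h11 : [c1, c2, c3] = ['L', 'e', 'u']
  · obtain ⟨rfl, rfl, rfl⟩ : c1 = 'L' ∧ c2 = 'e' ∧ c3 = 'u' := by simpa using h11
    decide
  rw [if_neg h11]
  by_cases h12 : [c1, c2, c3] = ['L', 'y', 's']
  · obtain ⟨rfl, rfl, rfl⟩ : c1 = 'L' ∧ c2 = 'y' ∧ c3 = 's' := by simpa using h12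
    decide
  rw [if_neg h12]
  by_cases h13 : [c1, c2, c3] = ['M', 'e', 't']
  · obtain ⟨rfl, rfl, rfl⟩ : c1 = 'M' ∧ c2 = 'e' ∧ c3 = 't' := by simpa using h13
    decide
  rw [if_neg h13]
  by_cases h14 : [c1, c2, c3] = ['P', 'h', 'e']
  · obtain ⟨rfl, rfl, rfl⟩ : c1 = 'P' ∧ c2 = 'h' ∧ c3 = 'e' := by simpa using h14
    decide
  rw [if_neg h14]
  by_cases h15 : [c1, c2, c3] = ['P', 'r', 'o']
  · obtain ⟨rfl, rfl, rfl⟩ : c1 = 'P' ∧ c2 = 'r' ∧ c3 = 'o' := by simpa using h15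
    decide
  rw [if_neg h15]
  by_cases h16 : [c1, c2, c3] = ['S', 'e', 'r']
  · obtain ⟨rfl, rfl, rfl⟩ : c1 = 'S' ∧ c2 = 'e' ∧ c3 = 'r' := by simpa using h16
    decide
  rw [if_neg h16]
  by_cases h17 : [c1, c2, c3] = ['T', 'h', 'r']
  · obtain ⟨rfl, rfl, rfl⟩ : c1 = 'T' ∧ c2 = 'h' ∧ c3 = 'r' := by simpa using h17
    decide
  rw [if_neg h17]
  by_cases h18 : [c1, c2, c3] = ['T', 'r', 'p']
  · obtain ⟨rfl, rfl, rfl⟩ : c1 = 'T' ∧ c2 = 'r' ∧ c3 = 'p' := by simpa using h18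
    decide
  rw [if_neg h18]
  by_cases h19 : [c1, c2, c3] = ['T', 'y', 'r']
  · obtain ⟨rfl, rfl, rfl⟩ : c1 = 'T' ∧ c2 = 'y' ∧ c3 = 'r' := by simpa using h19
    decide
  rw [if_neg h19]
  by_cases h20 : [c1, c2, c3] = ['V', 'a', 'l']
  · obtain ⟨rfl, rfl, rfl⟩ : c1 = 'V' ∧ c2 = 'a' ∧ c3 = 'l' := by simpa using h20
    decide
  rw [if_neg h20]
  by_cases h21 : [c1, c2, c3] = ['T', 'e', 'r']
  · obtain ⟨rfl, rfl, rfl⟩ : c1 = 'T' ∧ c2 = 'e' ∧ c3 = 'r' := by simpa using h21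
    decide
  rw [if_neg h21]
  unfold aaMatch3
  split
  · exact absurd rfl h1
  · exact absurd rfl h2
  · exact absurd rfl h3
  · exact absurd rfl h4
  · exact absurd rfl h5
  · exact absurd rfl h6
  · exact absurd rfl h7
  · exact absurd rfl h8
  · exact absurd rfl h9
  · exact absurd rfl h10
  · exact absurd rfl h11
  · exact absurd rfl h12
  · exact absurd rfl h13
  · exact absurd rfl h14
  · exact absurd rfl h15
  · exact absurd rfl h16
  · exact absurd rfl h17
  · exact absurd rfl h18
  · exact absurd rfl h19
  · exact absurd rfl h20
  · exact absurd rfl h21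
  · rfl

-- a slice shorter than every (three-character) code matches no item
theorem pyForA_short (sl : List Char) (h : sl.length < 3) :
    pyForA aaPairsA sl = none := by
  match sl, h with
  | [], _ => simp [pyForA, aaPairsA]
  | [a], _ => simp [pyForA, aaPairsA]
  | [a, b], _ => simp [pyForA, aaPairsA]

theorem loopA_eq (full : List Char) :
    ∀ (fuel i : Nat) (acc : List Char), full.length ≤ i + fuel →
      loopA full i acc fuel = acc ++ reSubAA (full.drop i) := by
  intro fuel
  induction fuel with
  | zero =>
    intro i acc h
    have hd : full.drop i = [] := List.drop_eq_nil_of_le (by omega)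
    simp [loopA, hd, reSubAA]
  | succ fuel' ih =>
    intro i acc h
    by_cases hi : i < full.length
    · have hcons : full.drop i = full[i] :: full.drop (i + 1) :=
        List.drop_eq_getElem_cons hi
      have hdd1 : (full.drop i).drop 1 = full.drop (i + 1) := by
        simp [List.drop_drop]
      have hdd3 : (full.drop i).drop 3 = full.drop (i + 3) := by
        simp [List.drop_drop]
      match hD : full.drop i with
      | c1 :: c2 :: c3 :: rest =>
        have hm : pyForA aaPairsA ((full.drop i).take 3) = aaMatch3 c1 c2 c3 := by
          rw [hD]; simpa using pyForA_eq3 c1 c2 c3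
        have hc1 : full[i] = c1 := by rw [hD] at hcons; exact (List.cons.injEq _ _ _ _ ▸ hcons).1.symm
        cases hm3 : aaMatch3 c1 c2 c3 with
        | some letter =>
          simp only [loopA, if_pos hi, hm, hm3]
          rw [ih (i + 3) (acc ++ [letter]) (by omega)]
          have : full.drop (i + 3) = rest := by rw [← hdd3, hD]; rfl
          rw [this]
          simp [reSubAA, hm3]
        | none =>
          simp only [loopA, if_pos hi, hm, hm3]
          rw [ih (i + 1) (acc ++ [full.getD i ' ']) (by omega)]
          have h1 : full.drop (i + 1) = c2 :: c3 :: rest := by rw [← hdd1, hD]; rfl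
          rw [h1]
          simp [reSubAA, hm3, List.getD, List.getElem?_eq_getElem hi, hc1]
      | [c1] =>
        have hm : pyForA aaPairsA ((full.drop i).take 3) = none := by
          rw [hD]; exact pyForA_short _ (by simp)
        simp only [loopA, if_pos hi, hm]
        rw [ih (i + 1) (acc ++ [full.getD i ' ']) (by omega)]
        have hc1 : full[i] = c1 := by rw [hD] at hcons; exact (List.cons.injEq _ _ _ _ ▸ hcons).1.symm
        have h1 : full.drop (i + 1) = [] := by rw [← hdd1, hD]; rfl
        rw [h1]
        simp [reSubAA, List.getD, List.getElem?_eq_getElem hi, hc1]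
      | [c1, c2] =>
        have hm : pyForA aaPairsA ((full.drop i).take 3) = none := by
          rw [hD]; exact pyForA_short _ (by simp)
        simp only [loopA, if_pos hi, hm]
        rw [ih (i + 1) (acc ++ [full.getD i ' ']) (by omega)]
        have hc1 : full[i] = c1 := by rw [hD] at hcons; exact (List.cons.injEq _ _ _ _ ▸ hcons).1.symm
        have h1 : full.drop (i + 1) = [c2] := by rw [← hdd1, hD]; rfl
        rw [h1]
        simp [reSubAA, List.getD, List.getElem?_eq_getElem hi, hc1]
      | [] =>
        exfalso
        have := List.length_drop (l := full) (i := i)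
        rw [hD] at this; simp at this; omega
    · have hd : full.drop i = [] := List.drop_eq_nil_of_le (by omega)
      simp [loopA, if_neg hi, hd, reSubAA]

-- ===== VERDICT (by name: the statement is the Claim_ definition above) =====
theorem convert_aa_notation_spec : Claim_equal_convert_aa_notation := by
  intro s _
  unfold Spec_convert_aa_notation convert_aa_notation convert_aa_notation_alt
  rw [loopA_eq s.toList s.toList.length 0 [] (by omega)]
  simp
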